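-- pv_equiv track=rewrite | github.com/rbakulin/algorithms_prep | hash-map-set/2352-equal-row-and-column-pairs/solution.py | get_number_of_equal_pairs
-- ===== SOURCE A (Python) =====
-- def get_number_of_equal_pairs(grid: list[list[int]]) -> int:
--     """
--     grid=[[3, 2, 1], [1, 7, 6], [2, 7, 7]], 1
--     vertical=[[3, 1, 2], [2, 7, 7], [1, 6, 7]]
--     """
--     equal = 0
--     n = len(grid)
--     column_grid = []
--     for i in range(n):  # index to use in all 3 lines
--         column = []  # one column = one array
--         for line in grid:  # going through all the lines and take 1 element from each WITH OUR GENERAL INDEX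
--             column.append(line[i])
--         column_grid.append(column)
--     for horizontal in grid:
--         for vertical in column_grid:
--             if vertical == horizontal:  # inefficient - need to check all n element in each line
--                 equal += 1
--     return equal
-- ===== SOURCE B (Python) =====
-- def get_number_of_equal_pairs(grid: list[list[int]]) -> int:
--     n = len(grid)
--     row_count = {}
--     for row in grid:
--         key = tuple(row)
--         row_count[key] = row_count.get(key, 0) + 1
--     total = 0
--     for j in range(n):
--         column = tuple(row[j] for row in grid)
--         total += row_count.get(column, 0)
--     return total
-- ===== Notes on version B (the rewrite author's own statement) =====
-- stated objective: alternative
-- what changed: Replaces A's explicit column-grid construction plus nested row-vs-column comparison loops with a dictionary counting row keys once and a single lookup per column.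
import Mathlib
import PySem

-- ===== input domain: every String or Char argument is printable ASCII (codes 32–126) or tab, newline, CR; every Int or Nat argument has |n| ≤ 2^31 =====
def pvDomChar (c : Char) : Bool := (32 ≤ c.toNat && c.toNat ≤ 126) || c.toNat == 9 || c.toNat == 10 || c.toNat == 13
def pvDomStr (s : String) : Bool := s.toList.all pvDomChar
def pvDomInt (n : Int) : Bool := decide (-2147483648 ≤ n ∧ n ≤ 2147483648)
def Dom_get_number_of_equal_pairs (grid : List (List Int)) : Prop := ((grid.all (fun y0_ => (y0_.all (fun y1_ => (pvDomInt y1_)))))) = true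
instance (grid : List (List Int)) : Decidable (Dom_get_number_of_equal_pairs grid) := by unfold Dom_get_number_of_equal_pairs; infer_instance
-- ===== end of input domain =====

-- B replaces A's column-grid construction plus nested row-vs-column comparison loops with a
-- dictionary counting row keys once and one lookup per column (alternative algorithm).

-- ===== PORT A =====
-- indexing line[i]: PySem.List.pyGetD with default 0 — exact under Pre_, which excludes the
-- inputs where Python's line[i] raises IndexError.
def get_number_of_equal_pairs (grid : List (List Int)) : Int :=
  let n : Int := (grid.length : Int)
  let column_grid : List (List Int) :=
    (PySem.List.pyRange 0 n 1).foldl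
      (fun cg i =>
        cg ++ [grid.foldl (fun col line => col ++ [PySem.List.pyGetD line i 0]) []]) []
  grid.foldl
    (fun equal horizontal =>
      column_grid.foldl
        (fun equal vertical => if vertical == horizontal then equal + 1 else equal) equal) 0

-- ===== PORT B =====
def get_number_of_equal_pairs_alt (grid : List (List Int)) : Int :=
  let n : Int := (grid.length : Int)
  let row_count : PySem.Dict (List Int) Int :=
    grid.foldl (fun d row => d.insert row (d.getD row 0 + 1)) PySem.Dict.empty
  (PySem.List.pyRange 0 n 1).foldl
    (fun total j =>
      total + row_count.getD (grid.map (fun row => PySem.List.pyGetD row j 0)) 0) 0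

-- ===== PRECONDITION & SPEC =====
-- Pre_ excludes exactly the ragged grids where some row is shorter than len(grid): there
-- Python A (and B alike) raises IndexError while indexing a column element.
def Pre_get_number_of_equal_pairs (grid : List (List Int)) : Prop :=
  ∀ row ∈ grid, grid.length ≤ row.length
instance (grid : List (List Int)) : Decidable (Pre_get_number_of_equal_pairs grid) := by
  unfold Pre_get_number_of_equal_pairs; infer_instance
def pvWitness_get_number_of_equal_pairs : List (List Int) := [[3, 2, 1], [1, 7, 6], [2, 7, 7]]

def Spec_get_number_of_equal_pairs (grid : List (List Int)) (out : Int) : Prop := out = get_number_of_equal_pairs_alt grid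
instance (grid : List (List Int)) (out : Int) : Decidable (Spec_get_number_of_equal_pairs grid out) := by unfold Spec_get_number_of_equal_pairs; infer_instance

-- ===== CLAIM (what is proved, stated in full; the proofs are below) =====
def Claim_equal_get_number_of_equal_pairs : Prop := ∀ (grid : List (List Int)), Dom_get_number_of_equal_pairs grid → Pre_get_number_of_equal_pairs grid → Spec_get_number_of_equal_pairs grid (get_number_of_equal_pairs grid)

-- ===== LEMMAS AND PROOFS =====

-- summing the count of each element of B in (a :: A) splits off the counts of a
theorem pv_sum_count_cons (a : List Int) (A B : List (List Int)) :
    (B.map (fun c => (((a :: A).count c : Nat) : Int))).sum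
      = (B.count a : Int) + (B.map (fun c => ((A.count c : Nat) : Int))).sum := by
  have hpt : ∀ c ∈ B, (((a :: A).count c : Nat) : Int)
      = ((A.count c : Nat) : Int) + (if c == a then 1 else 0) := by
    intro c _
    rw [List.count_cons]
    by_cases h : c = a
    · simp [h]
    · simp [h, Ne.symm h]
  rw [List.map_congr_left hpt, PySem.List.sum_map_add_int, PySem.List.sum_map_ite_one_zero,
      add_comm]
  rfl

-- double counting: summing B's count over A equals summing A's count over B
theorem pv_sum_count_comm (A B : List (List Int)) :
    (A.map (fun h => ((B.count h : Nat) : Int))).sum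
      = (B.map (fun c => ((A.count c : Nat) : Int))).sum := by
  induction A with
  | nil => simp
  | cons a A ih => simp only [List.map_cons, List.sum_cons, ih, pv_sum_count_cons]

theorem get_number_of_equal_pairs_eq (grid : List (List Int)) :
    get_number_of_equal_pairs grid = get_number_of_equal_pairs_alt grid := by
  unfold get_number_of_equal_pairs get_number_of_equal_pairs_alt
  simp only [PySem.List.foldl_append_singleton_eq_map, List.nil_append]
  set cols : List (List Int) :=
    (PySem.List.pyRange 0 (grid.length : Int) 1).map
      (fun i => grid.map (fun row => PySem.List.pyGetD row i 0)) with hcols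
  -- A side: inner loop counts matches of the row among the columns, outer loop sums
  have hA := PySem.List.foldl_congr_mem (l := grid) (init := (0 : Int))
    (f := fun equal horizontal =>
      cols.foldl (fun e v => if v == horizontal then e + 1 else e) equal)
    (g := fun equal horizontal => equal + (cols.count horizontal : Int))
    (fun acc x _ => PySem.List.foldl_beq_add_one cols x acc)
  rw [hA, PySem.List.foldl_add, zero_add]
  -- B side: each dictionary lookup is a row count
  have hB := PySem.List.foldl_congr_mem (l := PySem.List.pyRange 0 (grid.length : Int) 1)
    (init := (0 : Int))
    (f := fun total j =>
      total + (grid.foldl (fun d row => d.insert row (d.getD row 0 + 1))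
        PySem.Dict.empty).getD (grid.map (fun row => PySem.List.pyGetD row j 0)) 0)
    (g := fun total j =>
      total + (grid.count (grid.map (fun row => PySem.List.pyGetD row j 0)) : Int))
    (fun acc j _ => by
      show acc + (grid.foldl (fun d row => d.insert row (d.getD row 0 + 1))
          PySem.Dict.empty).getD (grid.map (fun row => PySem.List.pyGetD row j 0)) 0 = _
      rw [PySem.Dict.getD_foldl_insert_add_one]
      simp)
  rw [hB, PySem.List.foldl_add, zero_add, pv_sum_count_comm, hcols, List.map_map]
  rfl

-- ===== VERDICT (by name: the statement is the Claim_ definition above) =====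
theorem get_number_of_equal_pairs_spec : Claim_equal_get_number_of_equal_pairs := by
  intro grid _ _
  unfold Spec_get_number_of_equal_pairs
  exact get_number_of_equal_pairs_eq grid
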